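-- pv_equiv track=rewrite | github.com/yuq7-Yang/WB_Scraper | weibo_bot/config.py | _split_cookies
-- ===== SOURCE A (Python) =====
-- def _split_cookies(raw: str) -> list[str]:
--     if not raw.strip():
--         return []
--     normalized = raw.replace("\r\n", "\n").replace("\r", "\n")
--     parts = []
--     for chunk in normalized.split("||"):
--         parts.extend(chunk.split("\n"))
--     return [part.strip() for part in parts if part.strip()]
-- ===== SOURCE B (Python) =====
-- def _split_cookies(raw: str) -> list[str]:
--     # Single left-to-right character scan: flush the current buffer at each
--     # delimiter ("||", "\r\n", "\r", "\n"); no normalization pass, no nested split.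
--     parts = []
--     buf = []
--     i, n = 0, len(raw)
--     while i < n:
--         c = raw[i]
--         if c == "|" and i + 1 < n and raw[i + 1] == "|":
--             parts.append("".join(buf)); buf = []; i += 2
--         elif c == "\r":
--             parts.append("".join(buf)); buf = []
--             i += 2 if i + 1 < n and raw[i + 1] == "\n" else 1
--         elif c == "\n":
--             parts.append("".join(buf)); buf = []; i += 1
--         else:
--             buf.append(c); i += 1
--     parts.append("".join(buf))
--     return [p.strip() for p in parts if p.strip()]
-- ===== Notes on version B (the rewrite author's own statement) =====
-- stated objective: alternative
-- what changed: Replaces A's normalize-replace passes plus nested split-then-extend loops with a single left-to-right character scan that flushes a buffer at each delimiter (||, \r\n, \r, \n).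
import Mathlib
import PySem

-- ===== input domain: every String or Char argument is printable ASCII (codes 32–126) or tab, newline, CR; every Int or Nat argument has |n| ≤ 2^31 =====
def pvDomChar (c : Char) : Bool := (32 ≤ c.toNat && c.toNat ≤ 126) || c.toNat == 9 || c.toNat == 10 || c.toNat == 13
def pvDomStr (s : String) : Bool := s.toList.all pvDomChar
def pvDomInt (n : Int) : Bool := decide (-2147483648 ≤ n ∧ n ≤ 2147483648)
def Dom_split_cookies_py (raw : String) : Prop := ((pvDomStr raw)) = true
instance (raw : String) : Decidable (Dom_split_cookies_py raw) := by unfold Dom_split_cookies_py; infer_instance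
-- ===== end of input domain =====

-- B replaces A's replace/replace normalization and nested split loops by one
-- left-to-right character scan flushing a buffer at each delimiter (objective: alternative, same O(n) cost).

-- ===== PORT A =====
def split_cookies_py (raw : String) : List String :=
  if PySem.Str.strip raw = "" then []
  else
    let normalized := PySem.Str.replace (PySem.Str.replace raw "\r\n" "\n") "\r" "\n"
    let parts := (PySem.Chars.splitOn normalized.toList ['|', '|']).flatMap
      (fun chunk => PySem.Chars.splitOn chunk ['\n'])
    (parts.filter (fun p => !(PySem.Chars.strip p).isEmpty)).map
      (fun p => String.ofList (PySem.Chars.strip p))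

-- ===== PORT B =====
-- the while loop of Source B: current buffer `buf`, flush at "||", "\r\n", "\r", "\n"
def scanBuf : List Char → List Char → List (List Char)
  | [], buf => [buf]
  | '|' :: '|' :: rest, buf => buf :: scanBuf rest []
  | '\r' :: '\n' :: rest, buf => buf :: scanBuf rest []
  | '\r' :: rest, buf => buf :: scanBuf rest []
  | '\n' :: rest, buf => buf :: scanBuf rest []
  | c :: rest, buf => scanBuf rest (buf ++ [c])

def split_cookies_py_alt (raw : String) : List String :=
  ((scanBuf raw.toList []).filter (fun p => !(PySem.Chars.strip p).isEmpty)).map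
    (fun p => String.ofList (PySem.Chars.strip p))

-- ===== PRECONDITION & SPEC =====
def Spec_split_cookies_py (raw : String) (out : List String) : Prop := out = split_cookies_py_alt raw
instance (raw : String) (out : List String) : Decidable (Spec_split_cookies_py raw out) := by unfold Spec_split_cookies_py; infer_instance

-- ===== CLAIM (what is proved, stated in full; the proofs are below) =====
def Claim_equal_split_cookies_py : Prop := ∀ (raw : String), Dom_split_cookies_py raw → Spec_split_cookies_py raw (split_cookies_py raw)

-- ===== LEMMAS AND PROOFS =====

-- clean recursion equal to PySem.Chars.replace for a nonempty pattern
def repl (old new : List Char) : List Char → List Char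
  | [] => []
  | c :: t =>
    if old.isPrefixOf (c :: t) ∧ old ≠ [] then new ++ repl old new (t.drop (old.length - 1))
    else c :: repl old new t
termination_by l => l.length
decreasing_by
  all_goals simp [List.length_drop]

-- clean recursion equal to PySem.Chars.splitOn for a nonempty separator
def splitR (sep : List Char) : List Char → List (List Char)
  | [] => [[]]
  | c :: t =>
    if sep.isPrefixOf (c :: t) ∧ sep ≠ [] then [] :: splitR sep (t.drop (sep.length - 1))
    else (splitR sep t).modifyHead (c :: ·)
termination_by l => l.length
decreasing_by
  all_goals simp [List.length_drop]

-- buffer-free version of scanBuf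
def scanP : List Char → List (List Char)
  | [] => [[]]
  | '|' :: '|' :: t => [] :: scanP t
  | '\r' :: '\n' :: t => [] :: scanP t
  | '\r' :: t => [] :: scanP t
  | '\n' :: t => [] :: scanP t
  | c :: t => (scanP t).modifyHead (c :: ·)


-- ---- generic list helpers ----
theorem modifyHead_comp {α : Type} (f g : α → α) (l : List α) :
    (l.modifyHead f).modifyHead g = l.modifyHead (fun x => g (f x)) := by
  cases l <;> simp

theorem modifyHead_append_left {α : Type} (f : α → α) (l l' : List α) (h : l ≠ []) :
    l.modifyHead f ++ l' = (l ++ l').modifyHead f := by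
  cases l <;> simp_all

-- ---- splitR / repl are the fuel loops of PySem ----
theorem splitR_ne_nil (sep l : List Char) : splitR sep l ≠ [] := by
  fun_induction splitR sep l with
  | case1 => simp
  | case2 => simp
  | case3 c t h ih =>
      cases hs : splitR sep t with
      | nil => exact absurd hs ih
      | cons p ps => simp

theorem repl_go (old new : List Char) (hold : old ≠ []) :
    ∀ (fuel : ℕ) (l acc : List Char), l.length ≤ fuel →
    PySem.Chars.replace.go old new fuel l acc = acc.reverse ++ repl old new l := by
  intro fuel
  induction fuel with
  | zero =>
      intro l acc h
      have hl : l = [] := by cases l <;> simp_all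
      subst hl
      rw [PySem.Chars.replace.go.eq_def, repl.eq_def]
  | succ n ih =>
      intro l acc h
      cases l with
      | nil => rw [PySem.Chars.replace.go.eq_def, repl.eq_def]; simp
      | cons c t =>
          rw [PySem.Chars.replace.go.eq_def, repl.eq_def]
          by_cases hp : old.isPrefixOf (c :: t) = true
          · simp only [hp, if_pos, hold, ne_eq, not_false_iff, and_true]
            obtain ⟨m, hm⟩ : ∃ m, old.length = m + 1 := by
              cases old with
              | nil => exact absurd rfl hold
              | cons _ _ => exact ⟨_, rfl⟩
            have hdrop : List.drop old.length (c :: t) = t.drop (old.length - 1) := by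
              rw [hm]; simp
            rw [ih (List.drop old.length (c :: t)) (new.reverse ++ acc)
                  (by simp only [List.length_drop, List.length_cons] at h ⊢; omega)]
            rw [hdrop]
            simp
          · simp only [hp, Bool.false_eq_true, false_and, if_neg, not_false_iff]
            rw [ih t (c :: acc) (by simp only [List.length_cons] at h; omega)]
            simp

theorem repl_eq_replace (old new l : List Char) (hold : old ≠ []) :
    PySem.Chars.replace l old new = repl old new l := by
  rw [PySem.Chars.replace]
  have : old.isEmpty = false := by cases old <;> simp_all
  rw [this]
  simpa using repl_go old new hold l.length l [] le_rfl

theorem splitR_go (sep : List Char) (hsep : sep ≠ []) :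
    ∀ (fuel : ℕ) (l cur : List Char) (acc : List (List Char)), l.length ≤ fuel →
    PySem.Chars.splitOn.go sep fuel l cur acc
      = acc.reverse ++ (splitR sep l).modifyHead (cur.reverse ++ ·) := by
  intro fuel
  induction fuel with
  | zero =>
      intro l cur acc h
      have hl : l = [] := by cases l <;> simp_all
      subst hl
      rw [PySem.Chars.splitOn.go.eq_def, splitR.eq_def]
      simp
  | succ n ih =>
      intro l cur acc h
      cases l with
      | nil => rw [PySem.Chars.splitOn.go.eq_def, splitR.eq_def]; simp
      | cons c t =>
          rw [PySem.Chars.splitOn.go.eq_def, splitR.eq_def]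
          by_cases hp : sep.isPrefixOf (c :: t) = true
          · simp only [hp, reduceIte, hsep, ne_eq, not_false_iff, and_true]
            obtain ⟨m, hm⟩ : ∃ m, sep.length = m + 1 := by
              cases sep with
              | nil => exact absurd rfl hsep
              | cons _ _ => exact ⟨_, rfl⟩
            have hdrop : List.drop sep.length (c :: t) = t.drop (sep.length - 1) := by
              rw [hm]; simp
            rw [ih (List.drop sep.length (c :: t)) [] (cur.reverse :: acc)
                  (by simp only [List.length_drop, List.length_cons] at h ⊢; omega)]
            rw [hdrop]
            cases hsp : splitR sep (t.drop (sep.length - 1)) with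
            | nil => exact absurd hsp (splitR_ne_nil _ _)
            | cons p ps => simp
          · simp only [hp, Bool.false_eq_true, false_and, reduceIte]
            rw [ih t (c :: cur) acc (by simp only [List.length_cons] at h; omega)]
            rw [modifyHead_comp]
            simp
theorem splitR_eq_splitOn (sep l : List Char) (hsep : sep ≠ []) :
    PySem.Chars.splitOn l sep = splitR sep l := by
  rw [PySem.Chars.splitOn]
  rw [splitR_go sep hsep (l.length + 1) l [] [] (by omega)]
  cases h : splitR sep l with
  | nil => exact absurd h (splitR_ne_nil _ _)
  | cons p ps => simp

-- ---- equation lemmas for scanP ----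
theorem scanP_pipe (t : List Char) : scanP ('|'::'|'::t) = [] :: scanP t := by simp [scanP]
theorem scanP_crlf (t : List Char) : scanP ('\r'::'\n'::t) = [] :: scanP t := by simp [scanP]
theorem scanP_lf (t : List Char) : scanP ('\n'::t) = [] :: scanP t := by simp [scanP]
theorem scanP_cr (t : List Char) (h : t.head? ≠ some '\n') : scanP ('\r'::t) = [] :: scanP t := by
  cases t with
  | nil => simp [scanP]
  | cons c u =>
    have : c ≠ '\n' := by intro hc; subst hc; simp at h
    simp [scanP, this]
theorem scanP_other (c : Char) (t : List Char) (h1 : ¬(c = '|' ∧ t.head? = some '|'))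
    (h3 : c ≠ '\r') (h4 : c ≠ '\n') : scanP (c::t) = (scanP t).modifyHead (c :: ·) := by
  cases t with
  | nil => rw [scanP.eq_def]; simp_all
  | cons d u =>
    have hd : ¬(c = '|' ∧ d = '|') := by
      intro ⟨a, b⟩; exact h1 ⟨a, by simp [b]⟩
    rw [scanP.eq_def]
    simp_all

-- ---- scanP is scanBuf without the buffer ----
theorem scanP_ne_nil (l : List Char) : scanP l ≠ [] := by
  fun_induction scanP l with
  | case6 c t h1 h2 h3 h4 ih =>
      cases hs : scanP t with
      | nil => exact absurd hs ih
      | cons p ps => simp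
  | _ => simp

theorem scanBuf_eq (l buf : List Char) : scanBuf l buf = (scanP l).modifyHead (buf ++ ·) := by
  fun_induction scanBuf l buf with
  | case1 buf => simp [scanP]
  | case2 rest buf ih => rw [ih, scanP_pipe]; cases hs : scanP rest <;> simp
  | case3 rest buf ih => rw [ih, scanP_crlf]; cases hs : scanP rest <;> simp
  | case4 rest buf h ih =>
      have hh : rest.head? ≠ some '\n' := by
        cases rest with
        | nil => simp
        | cons d u => intro hd; exact h u (by simp_all)
      rw [ih, scanP_cr rest hh]; cases hs : scanP rest <;> simp
  | case5 rest buf ih => rw [ih, scanP_lf]; cases hs : scanP rest <;> simp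
  | case6 c rest buf h1 h2 h3 h4 ih =>
      have h1' : ¬(c = '|' ∧ rest.head? = some '|') := by
        rintro ⟨hc, hh⟩
        cases rest with
        | nil => simp at hh
        | cons d u => exact h1 u hc (by simp_all)
      rw [ih, scanP_other c rest h1' (fun e => h3 e) (fun e => h4 e), modifyHead_comp]
      cases hs : scanP rest <;> simp

-- ---- the normalization pass of A, as a function ----
def normN (l : List Char) : List Char := repl ['\r'] ['\n'] (repl ['\r','\n'] ['\n'] l)

theorem splitR_cons_neg (sep : List Char) (c : Char) (t : List Char)
    (h : ¬ sep.isPrefixOf (c::t) = true) :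
    splitR sep (c::t) = (splitR sep t).modifyHead (c :: ·) := by
  rw [splitR.eq_def]; simp [h]

theorem splitR_cons_pos (sep : List Char) (c : Char) (t : List Char) (hsep : sep ≠ [])
    (h : sep.isPrefixOf (c::t) = true) :
    splitR sep (c::t) = [] :: splitR sep (t.drop (sep.length - 1)) := by
  rw [splitR.eq_def]; simp [h, hsep]

theorem repl_cons_neg (old new : List Char) (c : Char) (t : List Char)
    (h : ¬ old.isPrefixOf (c::t) = true) : repl old new (c::t) = c :: repl old new t := by
  rw [repl.eq_def]; simp [h]

theorem repl_cons_pos (old new : List Char) (c : Char) (t : List Char) (hold : old ≠ [])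
    (h : old.isPrefixOf (c::t) = true) :
    repl old new (c::t) = new ++ repl old new (t.drop (old.length - 1)) := by
  rw [repl.eq_def]; simp [h, hold]

theorem normN_nil : normN [] = [] := by simp [normN, repl]

theorem normN_crlf (t : List Char) : normN ('\r'::'\n'::t) = '\n' :: normN t := by
  unfold normN
  rw [repl_cons_pos _ _ _ _ (by simp) (by simp [List.isPrefixOf])]
  simp only [List.length_cons, List.length_nil, List.drop_succ_cons, List.drop_zero,
    Nat.add_sub_cancel, List.singleton_append]
  rw [repl_cons_neg _ _ _ _ (by simp [List.isPrefixOf])]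

theorem normN_cr (t : List Char) (h : t.head? ≠ some '\n') : normN ('\r'::t) = '\n' :: normN t := by
  have hpre : ¬ (List.isPrefixOf ['\r','\n'] ('\r'::t)) = true := by
    cases t with
    | nil => simp [List.isPrefixOf]
    | cons d u =>
        have hd : d ≠ '\n' := by intro e; exact h (by simp [e])
        simp only [List.isPrefixOf, beq_self_eq_true, Bool.true_and, Bool.and_eq_true, beq_iff_eq]
        intro hcon
        exact hd hcon.1.symm
  unfold normN
  rw [repl_cons_neg _ _ _ _ hpre]
  rw [repl_cons_pos _ _ _ _ (by simp) (by simp [List.isPrefixOf])]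
  simp

theorem normN_other (c : Char) (t : List Char) (h : c ≠ '\r') : normN (c::t) = c :: normN t := by
  unfold normN
  rw [repl_cons_neg _ _ _ _ (by simp [List.isPrefixOf]; intro e; exact absurd e.symm h)]
  rw [repl_cons_neg _ _ _ _ (by simp [List.isPrefixOf]; exact fun e => h e.symm)]

theorem normN_head_pipe (t : List Char) (h : (normN t).head? = some '|') : t.head? = some '|' := by
  cases t with
  | nil => rw [normN_nil] at h; simp at h
  | cons c u =>
      by_cases hc : c = '\r'
      · subst hc
        by_cases hu : u.head? = some '\n'
        · obtain ⟨v, hv⟩ : ∃ v, u = '\n'::v := by cases u <;> simp_all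
          subst hv
          rw [normN_crlf] at h
          simp at h
        · rw [normN_cr u hu] at h
          simp at h
      · rw [normN_other c u hc] at h
        simpa using h

theorem flat_lf (L : List (List Char)) (hL : L ≠ []) :
    (L.modifyHead (fun x => '\n'::x)).flatMap (splitR ['\n'])
      = [] :: L.flatMap (splitR ['\n']) := by
  cases L with
  | nil => exact absurd rfl hL
  | cons h hs =>
      have : splitR ['\n'] ('\n'::h) = [] :: splitR ['\n'] h := by
        rw [splitR_cons_pos _ _ _ (by simp) (by simp [List.isPrefixOf])]; simp
      simp [this]

theorem flat_other (c : Char) (hc : c ≠ '\n') (L : List (List Char)) (hL : L ≠ []) :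
    (L.modifyHead (c :: ·)).flatMap (splitR ['\n'])
      = (L.flatMap (splitR ['\n'])).modifyHead (c :: ·) := by
  cases L with
  | nil => exact absurd rfl hL
  | cons h hs =>
      have hstep : splitR ['\n'] (c::h) = (splitR ['\n'] h).modifyHead (c :: ·) := by
        rw [splitR_cons_neg _ _ _ (by simp [List.isPrefixOf]; exact fun e => hc e.symm)]
      simp only [List.modifyHead_cons, List.flatMap_cons, hstep]
      rw [modifyHead_append_left _ _ _ (splitR_ne_nil _ _)]

theorem parts_eq_scanP (l : List Char) :
    (splitR ['|','|'] (normN l)).flatMap (fun chunk => splitR ['\n'] chunk) = scanP l := by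
  induction l using scanP.induct with
  | case1 => rw [normN_nil]; simp [splitR, scanP]
  | case2 t ih =>
      rw [normN_other _ _ (by decide), normN_other _ _ (by decide)]
      rw [splitR_cons_pos _ _ _ (by simp) (by simp [List.isPrefixOf])]
      simp only [List.length_cons, List.length_nil, List.drop_succ_cons, List.drop_zero,
        Nat.add_sub_cancel, List.flatMap_cons]
      rw [ih, scanP_pipe]
      simp [splitR]
  | case3 t ih =>
      rw [normN_crlf, scanP_crlf,
        splitR_cons_neg _ _ _ (by simp [List.isPrefixOf]),
        flat_lf _ (splitR_ne_nil _ _), ih]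
  | case4 t h ih =>
      have hh : t.head? ≠ some '\n' := by
        cases t with
        | nil => simp
        | cons d u => intro hd; exact h u (by simp_all)
      rw [normN_cr t hh, scanP_cr t hh,
        splitR_cons_neg _ _ _ (by simp [List.isPrefixOf]),
        flat_lf _ (splitR_ne_nil _ _), ih]
  | case5 t ih =>
      rw [normN_other _ _ (by decide), scanP_lf,
        splitR_cons_neg _ _ _ (by simp [List.isPrefixOf]),
        flat_lf _ (splitR_ne_nil _ _), ih]
  | case6 c t h1 h2 h3 h4 ih =>
      have hc3 : c ≠ '\r' := fun e => h3 e
      have hc4 : c ≠ '\n' := fun e => h4 e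
      have h1' : ¬(c = '|' ∧ t.head? = some '|') := by
        rintro ⟨hc, hhd⟩
        cases t with
        | nil => simp at hhd
        | cons d u => exact h1 u hc (by simp_all)
      rw [normN_other _ _ hc3]
      have hpre : ¬ (List.isPrefixOf ['|','|'] (c :: normN t)) = true := by
        intro hp
        cases hn : normN t with
        | nil => rw [hn] at hp; simp [List.isPrefixOf] at hp
        | cons d u =>
            rw [hn] at hp
            simp only [List.isPrefixOf, Bool.and_eq_true, beq_iff_eq,
              Bool.and_true] at hp
            exact h1' ⟨hp.1.symm, normN_head_pipe t (by simp [hn, ← hp.2])⟩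
      rw [splitR_cons_neg _ _ _ hpre, flat_other c hc4 _ (splitR_ne_nil _ _), ih,
        ← scanP_other c t h1' hc3 hc4]

-- ---- whitespace-only strings and the guard of A ----
theorem strip_eq_nil_of_allspace (p : List Char) (h : ∀ c ∈ p, PySem.Chars.isspace c = true) :
    PySem.Chars.strip p = [] := by
  unfold PySem.Chars.strip PySem.Chars.lstrip PySem.Chars.rstrip
  rw [List.dropWhile_eq_nil_iff.mpr h]
  simp

theorem allspace_of_strip_eq_nil (l : List Char) (h : PySem.Chars.strip l = []) :
    ∀ c ∈ l, PySem.Chars.isspace c = true := by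
  unfold PySem.Chars.strip PySem.Chars.rstrip at h
  have h2 : List.dropWhile PySem.Chars.isspace (PySem.Chars.lstrip l).reverse = [] := by
    have := congrArg List.reverse h
    simpa using this
  have h3 := List.dropWhile_eq_nil_iff.mp h2
  intro c hc
  have hc' : c ∈ List.takeWhile PySem.Chars.isspace l ++ List.dropWhile PySem.Chars.isspace l := by
    rw [List.takeWhile_append_dropWhile]; exact hc
  rcases List.mem_append.mp hc' with h4 | h4
  · exact List.mem_takeWhile_imp h4
  · exact h3 c (by simpa [PySem.Chars.lstrip] using h4)

theorem mem_scanP (l : List Char) : ∀ p ∈ scanP l, ∀ c ∈ p, c ∈ l := by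
  induction l using scanP.induct with
  | case1 =>
      intro p hp c hc
      simp [scanP] at hp
      subst hp
      simp at hc
  | case2 t ih =>
      intro p hp c hc
      rw [scanP_pipe] at hp
      rcases List.mem_cons.mp hp with rfl | hp
      · simp at hc
      · simp [ih p hp c hc]
  | case3 t ih =>
      intro p hp c hc
      rw [scanP_crlf] at hp
      rcases List.mem_cons.mp hp with rfl | hp
      · simp at hc
      · simp [ih p hp c hc]
  | case4 t h ih =>
      intro p hp c hc
      have hh : t.head? ≠ some '\n' := by
        cases t with
        | nil => simp
        | cons d u => intro hd; exact h u (by simp_all)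
      rw [scanP_cr t hh] at hp
      rcases List.mem_cons.mp hp with rfl | hp
      · simp at hc
      · simp [ih p hp c hc]
  | case5 t ih =>
      intro p hp c hc
      rw [scanP_lf] at hp
      rcases List.mem_cons.mp hp with rfl | hp
      · simp at hc
      · simp [ih p hp c hc]
  | case6 c0 t h1 h2 h3 h4 ih =>
      intro p hp c hc
      have h1' : ¬(c0 = '|' ∧ t.head? = some '|') := by
        rintro ⟨hc0, hhd⟩
        cases t with
        | nil => simp at hhd
        | cons d u => exact h1 u hc0 (by simp_all)
      rw [scanP_other c0 t h1' (fun e => h3 e) (fun e => h4 e)] at hp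
      cases hsc : scanP t with
      | nil => exact absurd hsc (scanP_ne_nil t)
      | cons q qs =>
          rw [hsc] at hp
          simp only [List.modifyHead_cons] at hp
          rcases List.mem_cons.mp hp with rfl | hp
          · rcases List.mem_cons.mp hc with rfl | hcq
            · simp
            · have := ih q (by rw [hsc]; exact List.mem_cons_self ..) c hcq
              simp [this]
          · have := ih p (by rw [hsc]; exact List.mem_cons_of_mem _ hp) c hc
            simp [this]

theorem split_cookies_py_spec : Claim_equal_split_cookies_py := by
  unfold Claim_equal_split_cookies_py Spec_split_cookies_py
  intro raw _
  simp only [split_cookies_py, split_cookies_py_alt]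
  rw [scanBuf_eq]
  have hmod : (scanP raw.toList).modifyHead (fun x => [] ++ x) = scanP raw.toList := by
    cases scanP raw.toList <;> simp
  rw [hmod]
  by_cases hs : PySem.Str.strip raw = ""
  · rw [if_pos hs]
    have hnil : PySem.Chars.strip raw.toList = [] := by
      have := congrArg String.toList hs
      simpa [PySem.Str.strip] using this
    have hall := allspace_of_strip_eq_nil _ hnil
    symm
    rw [List.map_eq_nil_iff, List.filter_eq_nil_iff]
    intro p hp
    simp [strip_eq_nil_of_allspace p (fun c hc => hall c (mem_scanP _ p hp c hc))]
  · rw [if_neg hs]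
    have e1 : ("\r\n" : String).toList = ['\r','\n'] := rfl
    have e2 : ("\r" : String).toList = ['\r'] := rfl
    have e3 : ("\n" : String).toList = ['\n'] := rfl
    have h1 : (PySem.Str.replace (PySem.Str.replace raw "\r\n" "\n") "\r" "\n").toList
        = normN raw.toList := by
      simp only [PySem.Str.replace, String.toList_ofList, e1, e2, e3]
      rw [repl_eq_replace _ _ _ (by decide), repl_eq_replace _ _ _ (by decide)]
      rfl
    have hfun : (fun chunk => PySem.Chars.splitOn chunk ['\n']) = fun chunk => splitR ['\n'] chunk :=
      funext fun c => splitR_eq_splitOn _ _ (by decide)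
    rw [h1, splitR_eq_splitOn _ _ (by decide), hfun, parts_eq_scanP]
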